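-- pv_equiv track=rewrite | github.com/haukurbjarnas/Forritun-1 | Lokapróf/final_p1.py | two_matching_dices
-- ===== SOURCE A (Python) =====
-- def two_matching_dices(throw_round):
--     number_of_dice = 1
--
--     result_list = []
--
--     for i in throw_round:
--         if i == 2:
--             result_list.append(2 * number_of_dice)
--         number_of_dice += 1
--
--     if len(result_list) > 0:
--         return result_list[len(result_list)-1]
--     else:
--         return 0
-- ===== SOURCE B (Python) =====
-- def two_matching_dices(throw_round):
--     seq = list(throw_round)
--     for i in range(len(seq) - 1, -1, -1):
--         if seq[i] == 2:
--             return 2 * (i + 1)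
--     return 0
-- ===== Notes on version B (the rewrite author's own statement) =====
-- stated objective: simpler
-- what changed: B scans the materialized sequence backwards and returns 2*(i+1) at the first (i.e. last) element equal to 2, instead of building a list of all matches and taking its last element.
import Mathlib
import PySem

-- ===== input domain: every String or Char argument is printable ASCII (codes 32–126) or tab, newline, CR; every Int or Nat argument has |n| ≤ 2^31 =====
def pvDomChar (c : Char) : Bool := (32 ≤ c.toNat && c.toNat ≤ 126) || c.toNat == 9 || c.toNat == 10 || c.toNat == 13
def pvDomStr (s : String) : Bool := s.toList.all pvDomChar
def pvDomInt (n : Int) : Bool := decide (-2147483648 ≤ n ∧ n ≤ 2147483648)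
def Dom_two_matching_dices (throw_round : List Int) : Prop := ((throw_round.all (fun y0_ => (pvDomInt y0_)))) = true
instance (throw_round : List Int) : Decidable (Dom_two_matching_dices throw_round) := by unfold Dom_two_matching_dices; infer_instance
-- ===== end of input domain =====

-- B replaces A's build-all-matches-then-take-last with a backward scan returning at the last 2 (same values; simpler, O(1) extra space).
-- ===== PORT A =====
def aGo (l : List Int) (n : Int) (acc : List Int) : List Int :=
  match l with
  | [] => acc
  | i :: rest => aGo rest (n + 1) (if i = 2 then acc ++ [2 * n] else acc)

def two_matching_dices (throw_round : List Int) : Int :=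
  let result_list := aGo throw_round 1 []
  if result_list.length > 0 then
    (PySem.List.pyGet? result_list ((result_list.length : Int) - 1)).getD 0
  else 0

-- ===== PORT B =====
-- index loop from len-1 down to 0 over the materialized list = recursion over the reverse with 1-based position k
def altGo (m : List Int) (k : Int) : Int :=
  match m with
  | [] => 0
  | x :: xs => if x = 2 then 2 * k else altGo xs (k - 1)

def two_matching_dices_alt (throw_round : List Int) : Int :=
  altGo throw_round.reverse (throw_round.length : Int)

-- ===== PRECONDITION & SPEC =====
def Spec_two_matching_dices (throw_round : List Int) (out : Int) : Prop := out = two_matching_dices_alt throw_round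
instance (throw_round : List Int) (out : Int) : Decidable (Spec_two_matching_dices throw_round out) := by unfold Spec_two_matching_dices; infer_instance

-- ===== CLAIM (what is proved, stated in full; the proofs are below) =====
def Claim_equal_two_matching_dices : Prop := ∀ (throw_round : List Int), Dom_two_matching_dices throw_round → Spec_two_matching_dices throw_round (two_matching_dices throw_round)

-- ===== LEMMAS AND PROOFS =====
def resOf (l : List Int) (n : Int) : List Int :=
  match l with
  | [] => []
  | x :: xs => (if x = 2 then [2 * n] else []) ++ resOf xs (n + 1)

theorem aGo_eq (l : List Int) : ∀ (n : Int) (acc : List Int), aGo l n acc = acc ++ resOf l n := by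
  induction l with
  | nil => intro n acc; simp [aGo, resOf]
  | cons x xs ih =>
    intro n acc
    simp only [aGo, resOf, ih]
    split <;> simp

theorem resOf_append (l : List Int) : ∀ (x : Int) (n : Int),
    resOf (l ++ [x]) n = resOf l n ++ (if x = 2 then [2 * (n + l.length)] else []) := by
  induction l with
  | nil => intro x n; simp [resOf]
  | cons y ys ih =>
    intro x n
    simp only [List.cons_append, resOf, ih, List.length_cons]
    split <;> (simp; ring_nf)

theorem key (l : List Int) : ∀ (n : Int),
    (resOf l n).getLastD 0 = altGo l.reverse (n + (l.length : Int) - 1) := by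
  induction l using List.reverseRecOn with
  | nil => intro n; simp [resOf, altGo]
  | append_singleton ys x ih =>
    intro n
    rw [resOf_append]
    simp only [List.reverse_append, List.reverse_cons, List.reverse_nil, List.nil_append,
      List.cons_append, altGo, List.length_append, List.length_cons, List.length_nil]
    split
    · simp; ring
    · simp only [List.append_nil]
      rw [ih]
      congr 1
      push_cast
      ring

theorem a_eq_lastD (l : List Int) :
    two_matching_dices l = (resOf l 1).getLastD 0 := by
  simp only [two_matching_dices, aGo_eq, List.nil_append]
  rcases h : resOf l 1 with _ | ⟨y, ys⟩
  · simp
  · have hlen : 0 < (y :: ys).length := by simp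
    rw [if_pos hlen]
    have : ((y :: ys).length : Int) - 1 = (((y :: ys).length - 1 : Nat) : Int) := by
      simp [List.length_cons]
    rw [this, PySem.List.pyGet?_natCast]
    rw [List.getElem?_eq_getElem (by simp)]
    simp [List.getLastD_eq_getLast?, List.getLast?_eq_getElem?]
    rfl

-- ===== VERDICT (by name: the statement is the Claim_ definition above) =====
theorem two_matching_dices_spec : Claim_equal_two_matching_dices := by
  intro l _
  show two_matching_dices l = two_matching_dices_alt l
  rw [a_eq_lastD, two_matching_dices_alt, key l 1]
  norm_num
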